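-- pv_equiv track=rewrite | github.com/samienda/contests | E_Simon_s_Wordplay.py | find
-- ===== SOURCE A (Python) =====
-- from collections import Counter
--
-- def find(ch, words, dic, len_words, n):
--     adif = []
--     for i in range(n):
--         length = len_words[i]
--         a = Counter(words[i])[ch]
--         adif.append([length - (2 * a), i])
--
--     compare = [dic[ch], sum(len_words) - dic[ch]]
--     adif.sort()
--
--     while adif and compare[0] <= compare[1]:
--         _, idx = adif.pop()
--         word = words[idx]
--
--         a = Counter(word)[ch]
--         compare[0] -= a
--         compare[1] -= (len(word) - a)
--
--     return len(adif)
-- ===== SOURCE B (Python) =====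
-- def find(ch, words, dic, len_words, n):
--     # selection instead of sort: repeatedly extract the current maximum while the
--     # balance stays non-negative; costs precomputed once, one scalar diff
--     diff = sum(len_words) - 2 * dic[ch]
--     items = []
--     for i in range(n):
--         a = sum(c == ch for c in words[i])
--         items.append((len_words[i] - 2 * a, i, len(words[i]) - 2 * a))
--     while items and diff >= 0:
--         m = max(items, key=lambda t: (t[0], t[1]))
--         items.remove(m)
--         diff -= m[2]
--     return len(items)
-- ===== Notes on version B (the rewrite author's own statement) =====
-- stated objective: alternative
-- what changed: B never sorts: it repeatedly extracts the current maximum (selection) from the unsorted item list while a single scalar balance diff stays non-negative, with per-word removal costs precomputed once, instead of A's sort followed by pop-from-the-end with the two-element compare list and a Counter rebuilt on every pop.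
import Mathlib
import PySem

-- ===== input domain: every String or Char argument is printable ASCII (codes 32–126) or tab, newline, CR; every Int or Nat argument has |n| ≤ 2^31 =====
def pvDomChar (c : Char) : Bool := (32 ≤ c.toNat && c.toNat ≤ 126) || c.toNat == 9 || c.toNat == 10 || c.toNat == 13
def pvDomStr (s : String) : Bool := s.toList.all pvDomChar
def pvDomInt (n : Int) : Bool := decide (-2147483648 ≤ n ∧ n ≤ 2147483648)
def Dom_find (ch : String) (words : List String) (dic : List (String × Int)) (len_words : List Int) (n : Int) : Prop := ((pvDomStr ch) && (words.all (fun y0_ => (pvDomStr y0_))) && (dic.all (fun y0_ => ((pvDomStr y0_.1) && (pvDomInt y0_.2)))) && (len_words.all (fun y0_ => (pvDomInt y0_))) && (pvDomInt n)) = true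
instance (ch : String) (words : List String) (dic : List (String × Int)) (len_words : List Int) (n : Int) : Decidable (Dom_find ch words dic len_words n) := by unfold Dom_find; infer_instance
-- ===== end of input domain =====

-- B replaces A's sort-then-pop greedy by repeated maximum EXTRACTION (selection, no sort),
-- with per-word removal costs precomputed once and a single scalar balance diff.

-- ===== PORT A =====
-- Counter(word)[ch]: the number of characters of word equal to ch (0 unless ch is one character) — exact.
def pvCount (ch : String) (w : String) : Int :=
  match ch.toList with
  | [c] => (w.toList.count c : Int)
  | _ => 0

-- the while loop: pop from the end while adif nonempty and compare[0] <= compare[1]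
def pvLoopA (ch : String) (words : List String) (l : List (Int × Int)) (c0 c1 : Int) : Int :=
  if h : l ≠ [] ∧ c0 ≤ c1 then
    let idx := (l.getLast h.1).2
    let word := PySem.List.pyGetD words idx ""
    let a := pvCount ch word
    pvLoopA ch words l.dropLast (c0 - a) (c1 - (PySem.Str.len word - a))
  else (l.length : Int)
termination_by l.length
decreasing_by have := h.1; cases l with | nil => exact absurd rfl this | cons a t => simp

def find (ch : String) (words : List String) (dic : List (String × Int)) (len_words : List Int) (n : Int) : Int :=
  let adif := (PySem.List.pyRange 0 n 1).foldl
    (fun acc i =>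
      let length := PySem.List.pyGetD len_words i 0
      let a := pvCount ch (PySem.List.pyGetD words i "")
      acc ++ [(length - 2 * a, i)]) []
  let c0 := (PySem.Dict.mk dic).getD ch 0
  let c1 := len_words.sum - c0
  let sadif := PySem.List.sorted2 adif (·.1) (·.2)
  pvLoopA ch words sadif c0 c1

-- ===== PORT B =====
-- termination helper for the while loop below: max(items, key=…) returns a member.
theorem pvFold_mem {α : Type} (f : Option α → α → Option α)
    (hf : ∀ acc x, f acc x = some x ∨ f acc x = acc) :
    ∀ (l : List α) (acc : Option α) (m : α), l.foldl f acc = some m → acc = some m ∨ m ∈ l := by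
  intro l
  induction l with
  | nil => intro acc m h; exact Or.inl h
  | cons x t ih =>
      intro acc m h
      rcases ih (f acc x) m h with h1 | h1
      · rcases hf acc x with h2 | h2
        · rw [h2] at h1
          injection h1 with h1
          exact Or.inr (h1 ▸ List.mem_cons_self)
        · rw [h2] at h1; exact Or.inl h1
      · exact Or.inr (List.mem_cons_of_mem _ h1)

theorem pvMax2_mem {l : List (Int × Int × Int)} {m : Int × Int × Int}
    (h : PySem.List.max2? l (fun t => t.1) (fun t => t.2.1) = some m) : m ∈ l := by
  unfold PySem.List.max2? at h
  rcases pvFold_mem _ (fun acc x => by cases acc with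
      | none => exact Or.inl rfl
      | some m0 => dsimp only []; split <;> simp) l none m h with h1 | h1
  · exact absurd h1 (by simp)
  · exact h1

-- the while loop: m = max(items, key=(t0,t1)); items.remove(m); diff -= m[2].
-- items.remove(m) with m ∈ items is List.erase (PySem.List.remove?_eq_some_erase).
def pvLoopB (items : List (Int × Int × Int)) (diff : Int) : Int :=
  if h : items ≠ [] ∧ 0 ≤ diff then
    match hm : PySem.List.max2? items (fun t => t.1) (fun t => t.2.1) with
    | some m => pvLoopB (items.erase m) (diff - m.2.2)
    | none => (items.length : Int)   -- unreachable: max of a nonempty list exists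
  else (items.length : Int)
termination_by items.length
decreasing_by
  have hmem := pvMax2_mem hm
  have hpos : 0 < items.length := List.length_pos_of_mem hmem
  rw [List.length_erase_of_mem hmem]; omega

def find_alt (ch : String) (words : List String) (dic : List (String × Int)) (len_words : List Int) (n : Int) : Int :=
  let diff := len_words.sum - 2 * (PySem.Dict.mk dic).getD ch 0
  -- a = sum(c == ch for c in words[i]) counts the characters equal to ch: pvCount, exact
  let items := (PySem.List.pyRange 0 n 1).foldl
    (fun acc i =>
      let word := PySem.List.pyGetD words i ""
      let a := pvCount ch word
      acc ++ [(PySem.List.pyGetD len_words i 0 - 2 * a, i, PySem.Str.len word - 2 * a)]) []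
  pvLoopB items diff

-- ===== PRECONDITION & SPEC =====
-- exactly where Python A returns: dic[ch] must exist (else KeyError) and the first n entries
-- of words and len_words must exist (else IndexError)
def Pre_find (ch : String) (words : List String) (dic : List (String × Int)) (len_words : List Int) (n : Int) : Prop :=
  n ≤ (words.length : Int) ∧ n ≤ (len_words.length : Int) ∧ ((PySem.Dict.mk dic).get? ch).isSome
instance (ch : String) (words : List String) (dic : List (String × Int)) (len_words : List Int) (n : Int) : Decidable (Pre_find ch words dic len_words n) := by unfold Pre_find; infer_instance

def pvWitness_find : String × List String × (List (String × Int)) × List Int × Int :=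
  ("a", ["ab", "ba"], [("a", 2)], [2, 2], 2)

def Spec_find (ch : String) (words : List String) (dic : List (String × Int)) (len_words : List Int) (n : Int) (out : Int) : Prop := out = find_alt ch words dic len_words n
instance (ch : String) (words : List String) (dic : List (String × Int)) (len_words : List Int) (n : Int) (out : Int) : Decidable (Spec_find ch words dic len_words n out) := by unfold Spec_find; infer_instance

-- ===== CLAIM (what is proved, stated in full; the proofs are below) =====
def Claim_equal_find : Prop := ∀ (ch : String) (words : List String) (dic : List (String × Int)) (len_words : List Int) (n : Int), Dom_find ch words dic len_words n → Pre_find ch words dic len_words n → Spec_find ch words dic len_words n (find ch words dic len_words n)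

-- ===== LEMMAS AND PROOFS =====

-- annotation map: attach to an A-pair (value, idx) the removal cost B precomputes
def pvG (ch : String) (words : List String) (p : Int × Int) : Int × Int × Int :=
  (p.1, p.2, PySem.Str.len (PySem.List.pyGetD words p.2 "") - 2 * pvCount ch (PySem.List.pyGetD words p.2 ""))

-- the boolean comparator max2? uses on our triples, and its meaning
def pvLt3 (a b : Int × Int × Int) : Bool :=
  decide (a.1 < b.1) || (!decide (b.1 < a.1) && decide (a.2.1 < b.2.1))

theorem pvLt3_iff (a b : Int × Int × Int) :
    pvLt3 a b = true ↔ (a.1 < b.1 ∨ (a.1 = b.1 ∧ a.2.1 < b.2.1)) := by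
  simp [pvLt3]; omega

theorem pvLt3_false_iff (a b : Int × Int × Int) :
    pvLt3 a b = false ↔ ¬ (a.1 < b.1 ∨ (a.1 = b.1 ∧ a.2.1 < b.2.1)) := by
  rw [← Bool.not_eq_true, pvLt3_iff]

-- the fold step of max2? on our key pair
def pvStep (acc : Option (Int × Int × Int)) (x : Int × Int × Int) : Option (Int × Int × Int) :=
  match acc with
  | none => some x
  | some m => if pvLt3 m x then some x else some m

theorem pvMax2_eq_fold (l : List (Int × Int × Int)) :
    PySem.List.max2? l (fun t => t.1) (fun t => t.2.1) = l.foldl pvStep none := by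
  unfold PySem.List.max2? pvStep pvLt3
  congr 1
  funext acc x
  cases acc <;> rfl

-- full spec of the fold: the result is a member maximal under pvLt3
theorem pvMaxFold_spec (l : List (Int × Int × Int)) :
    ∀ m0 : Int × Int × Int, ∃ m, l.foldl pvStep (some m0) = some m ∧
      (m = m0 ∨ m ∈ l) ∧ pvLt3 m m0 = false ∧ ∀ y ∈ l, pvLt3 m y = false := by
  induction l with
  | nil =>
      intro m0
      exact ⟨m0, rfl, Or.inl rfl, by rw [pvLt3_false_iff]; omega, by simp⟩
  | cons x t ih =>
      intro m0
      by_cases hx : pvLt3 m0 x = true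
      · obtain ⟨m, hfold, hmem, hmax, hall⟩ := ih x
        have hfold' : (x :: t).foldl pvStep (some m0) = some m := by
          simpa [pvStep, hx] using hfold
        have hmx : pvLt3 m x = false := hmax
        refine ⟨m, hfold', ?_, ?_, ?_⟩
        · rcases hmem with h | h
          · exact Or.inr (h ▸ List.mem_cons_self)
          · exact Or.inr (List.mem_cons_of_mem _ h)
        · rw [pvLt3_false_iff] at hmx ⊢
          rw [pvLt3_iff] at hx
          omega
        · intro y hy
          rcases List.mem_cons.mp hy with rfl | hy
          · exact hmx
          · exact hall y hy
      · have hx' : pvLt3 m0 x = false := Bool.eq_false_iff.mpr hx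
        obtain ⟨m, hfold, hmem, hmax, hall⟩ := ih m0
        have hfold' : (x :: t).foldl pvStep (some m0) = some m := by
          simpa [pvStep, hx'] using hfold
        refine ⟨m, hfold', ?_, hmax, ?_⟩
        · rcases hmem with h | h
          · exact Or.inl h
          · exact Or.inr (List.mem_cons_of_mem _ h)
        · intro y hy
          rcases List.mem_cons.mp hy with rfl | hy
          · rw [pvLt3_false_iff] at hmax hx' ⊢
            omega
          · exact hall y hy

theorem pvMax2_spec (l : List (Int × Int × Int)) (hne : l ≠ []) :
    ∃ m, PySem.List.max2? l (fun t => t.1) (fun t => t.2.1) = some m ∧ m ∈ l ∧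
      ∀ y ∈ l, pvLt3 m y = false := by
  cases l with
  | nil => exact absurd rfl hne
  | cons x t =>
      obtain ⟨m, hfold, hmem, hmax, hall⟩ := pvMaxFold_spec t x
      refine ⟨m, ?_, ?_, ?_⟩
      · rw [pvMax2_eq_fold]
        simpa [pvStep] using hfold
      · rcases hmem with h | h
        · exact h ▸ List.mem_cons_self
        · exact List.mem_cons_of_mem _ h
      · intro y hy
        rcases List.mem_cons.mp hy with rfl | hy
        · exact hmax
        · exact hall y hy

-- key-injectivity: triples in the list are determined by their compare key (t.1, t.2.1)
def pvInj (l : List (Int × Int × Int)) : Prop :=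
  ∀ a ∈ l, ∀ b ∈ l, a.1 = b.1 → a.2.1 = b.2.1 → a = b

theorem pvInj_map_pvG (ch : String) (words : List String) (xs : List (Int × Int)) :
    pvInj (xs.map (pvG ch words)) := by
  intro a ha b hb h1 h2
  obtain ⟨p, hp, rfl⟩ := List.mem_map.mp ha
  obtain ⟨q, hq, rfl⟩ := List.mem_map.mp hb
  simp only [pvG] at h1 h2 ⊢
  rw [h1, h2]

theorem pvInj_of_sublist {l l' : List (Int × Int × Int)} (hs : l'.Sublist l) (h : pvInj l) :
    pvInj l' :=
  fun a ha b hb => h a (hs.subset ha) b (hs.subset hb)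

-- unfolding lemmas for pvLoopB
theorem pvLoopB_step {l : List (Int × Int × Int)} {d : Int} {m : Int × Int × Int}
    (hne : l ≠ []) (hd : 0 ≤ d)
    (hm : PySem.List.max2? l (fun t => t.1) (fun t => t.2.1) = some m) :
    pvLoopB l d = pvLoopB (l.erase m) (d - m.2.2) := by
  rw [pvLoopB, dif_pos ⟨hne, hd⟩]
  split
  · next m' hm' => rw [hm] at hm'; injection hm' with hm'; rw [hm']
  · next hm' => rw [hm] at hm'; cases hm'

theorem pvLoopB_stop {l : List (Int × Int × Int)} {d : Int} (h : l = [] ∨ d < 0) :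
    pvLoopB l d = (l.length : Int) := by
  rw [pvLoopB, dif_neg]
  rintro ⟨h1, h2⟩
  rcases h with h | h
  · exact h1 h
  · omega

-- pvLoopB is invariant under permutation of a key-injective list
theorem pvLoopB_perm : ∀ (k : Nat) (l l' : List (Int × Int × Int)) (d : Int),
    l.length ≤ k → pvInj l → l.Perm l' → pvLoopB l d = pvLoopB l' d := by
  intro k
  induction k with
  | zero =>
      intro l l' d hlen _ hperm
      have h0 : l = [] := List.eq_nil_of_length_eq_zero (Nat.le_zero.mp hlen)
      subst h0
      have h0' : l' = [] := hperm.symm.eq_nil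
      subst h0'
      rfl
  | succ k ih =>
      intro l l' d hlen hinj hperm
      by_cases hnil : l = []
      · subst hnil
        have h0' : l' = [] := hperm.symm.eq_nil
        subst h0'
        rfl
      · have hnil' : l' ≠ [] := by
          intro h; subst h; exact hnil hperm.eq_nil
        by_cases hd : 0 ≤ d
        · obtain ⟨m, hm, hmem, hmax⟩ := pvMax2_spec l hnil
          obtain ⟨m', hm', hmem', hmax'⟩ := pvMax2_spec l' hnil'
          have hmm : m = m' := by
            have h1 : pvLt3 m m' = false := hmax m' (hperm.mem_iff.mpr hmem')
            have h2 : pvLt3 m' m = false := hmax' m (hperm.mem_iff.mp hmem)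
            rw [pvLt3_false_iff] at h1 h2
            exact hinj m hmem m' (hperm.mem_iff.mpr hmem') (by omega) (by omega)
          rw [pvLoopB_step hnil hd hm, pvLoopB_step hnil' hd hm', ← hmm]
          apply ih
          · have hpos := List.length_pos_of_mem hmem
            rw [List.length_erase_of_mem hmem]; omega
          · exact pvInj_of_sublist (List.erase_sublist ..) hinj
          · exact hperm.erase m
        · rw [pvLoopB_stop (Or.inr (by omega)), pvLoopB_stop (Or.inr (by omega)),
            hperm.length_eq]

-- strict lexicographic order on A's pairs
def pvLtP (a b : Int × Int) : Prop := a.1 < b.1 ∨ (a.1 = b.1 ∧ a.2 < b.2)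

-- on a strictly sorted pair list, A's pop-from-the-end loop is B's max-extraction loop
theorem pvLoopA_eq_pvLoopB (ch : String) (words : List String) :
    ∀ (s : List (Int × Int)), s.Pairwise pvLtP → ∀ c0 c1 : Int,
      pvLoopA ch words s c0 c1 = pvLoopB (s.map (pvG ch words)) (c1 - c0) := by
  intro s
  induction s using List.reverseRecOn with
  | nil =>
      intro _ c0 c1
      rw [pvLoopA, pvLoopB]
      simp
  | append_singleton t p ih =>
      intro hpw c0 c1
      rw [List.pairwise_append] at hpw
      obtain ⟨hpt, -, hcross⟩ := hpw
      have hlt : ∀ q ∈ t, pvLtP q p := fun q hq => hcross q hq p (by simp)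
      rw [pvLoopA]
      by_cases hc : c0 ≤ c1
      · have hne : t ++ [p] ≠ [] := by simp
        simp only [hne, hc, and_true, ne_eq, not_false_iff, dite_true]
        rw [List.getLast_append_singleton, List.dropLast_concat, ih hpt]
        have hmapne : (t ++ [p]).map (pvG ch words) ≠ [] := by simp
        have hd : 0 ≤ c1 - c0 := by omega
        obtain ⟨m, hm, hmem, hmax⟩ := pvMax2_spec _ hmapne
        have hmp : m = pvG ch words p := by
          rcases List.mem_map.mp hmem with ⟨q, hq, rfl⟩
          rcases List.mem_append.mp hq with hq | hq
          · exfalso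
            have h1 := hmax (pvG ch words p)
              (List.mem_map_of_mem (by simp))
            rw [pvLt3_false_iff] at h1
            have h2 := hlt q hq
            simp only [pvG] at h1
            unfold pvLtP at h2
            omega
          · simp only [List.mem_singleton] at hq
            rw [hq]
        rw [hmp] at hm
        have hnotmem : pvG ch words p ∉ t.map (pvG ch words) := by
          intro hmemt
          rcases List.mem_map.mp hmemt with ⟨q, hq, heq⟩
          have h2 := hlt q hq
          have h1 : q.1 = p.1 ∧ q.2 = p.2 := by
            have := congrArg Prod.fst heq
            have := congrArg (fun t => t.2.1) heq
            simp only [pvG] at *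
            constructor <;> assumption
          unfold pvLtP at h2
          omega
        rw [List.map_append, pvLoopB_step (by simp) hd (by rw [← List.map_append]; exact hm),
          List.erase_append_right _ hnotmem]
        simp only [List.map_cons, List.map_nil, List.erase_cons_head, List.append_nil]
        have harith : c1 - (PySem.Str.len (PySem.List.pyGetD words p.2 "") - pvCount ch (PySem.List.pyGetD words p.2 "")) - (c0 - pvCount ch (PySem.List.pyGetD words p.2 ""))
            = c1 - c0 - (pvG ch words p).2.2 := by
          simp only [pvG]
          ring
        rw [harith]
      · simp only [hc, and_false, dite_false]
        rw [pvLoopB_stop (Or.inr (by omega))]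
        simp

-- insertion-sort comparator on pairs, and its meaning
def pvLt2 (a b : Int × Int) : Bool :=
  decide (a.1 < b.1) || (!decide (b.1 < a.1) && decide (a.2 < b.2))

theorem pvLt2_iff (a b : Int × Int) :
    pvLt2 a b = true ↔ (a.1 < b.1 ∨ (a.1 = b.1 ∧ a.2 < b.2)) := by
  simp [pvLt2]; omega

theorem pvLt2_false_iff (a b : Int × Int) :
    pvLt2 a b = false ↔ ¬ (a.1 < b.1 ∨ (a.1 = b.1 ∧ a.2 < b.2)) := by
  rw [← Bool.not_eq_true, pvLt2_iff]

theorem pvSorted2_eq_fold (xs : List (Int × Int)) :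
    PySem.List.sorted2 xs (·.1) (·.2) = xs.foldl (fun acc x => PySem.List.insertBy pvLt2 x acc) [] := by
  unfold PySem.List.sorted2 pvLt2
  rfl

theorem pvInsertBy_pairwise {ys : List (Int × Int)} (x : Int × Int)
    (h : ys.Pairwise (fun a b => pvLt2 b a = false)) :
    (PySem.List.insertBy pvLt2 x ys).Pairwise (fun a b => pvLt2 b a = false) := by
  induction ys with
  | nil => simp [PySem.List.insertBy]
  | cons y ys ih =>
      rw [List.pairwise_cons] at h
      rw [PySem.List.insertBy]
      by_cases hb : pvLt2 x y = true
      · rw [if_pos hb]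
        rw [List.pairwise_cons]
        refine ⟨?_, List.Pairwise.cons h.1 h.2⟩
        intro z hz
        rcases List.mem_cons.mp hz with rfl | hz
        · rw [pvLt2_false_iff]; rw [pvLt2_iff] at hb; omega
        · have h1 := h.1 z hz
          rw [pvLt2_false_iff] at h1 ⊢
          rw [pvLt2_iff] at hb
          omega
      · have hb' : pvLt2 x y = false := Bool.eq_false_iff.mpr hb
        rw [if_neg hb]
        rw [List.pairwise_cons]
        refine ⟨?_, ih h.2⟩
        intro z hz
        rcases (PySem.List.mem_insertBy pvLt2 x z ys).mp hz with rfl | hz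
        · exact hb'
        · exact h.1 z hz

theorem pvSorted2_pairwise (xs : List (Int × Int)) :
    (PySem.List.sorted2 xs (·.1) (·.2)).Pairwise (fun a b => pvLt2 b a = false) := by
  rw [pvSorted2_eq_fold]
  have : ∀ (l : List (Int × Int)) (acc : List (Int × Int)),
      acc.Pairwise (fun a b => pvLt2 b a = false) →
      (l.foldl (fun acc x => PySem.List.insertBy pvLt2 x acc) acc).Pairwise
        (fun a b => pvLt2 b a = false) := by
    intro l
    induction l with
    | nil => intro acc h; exact h
    | cons x t ih =>
        intro acc h
        exact ih _ (pvInsertBy_pairwise x h)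
  exact this xs [] (by simp)

-- pyRange a b (step 1) is strictly increasing
theorem pvRange_pairwise (a b : Int) : (PySem.List.pyRange a b).Pairwise (· < ·) := by
  unfold PySem.List.pyRange
  rw [if_neg (by norm_num)]
  rw [List.pairwise_map]
  refine (List.pairwise_lt_range).imp ?_
  intro k1 k2 h
  omega

-- the strictly sorted shape of A's sorted working list
theorem pvSorted_adif_strict (adif : List (Int × Int)) (hnd : (adif.map (·.2)).Nodup) :
    (PySem.List.sorted2 adif (·.1) (·.2)).Pairwise pvLtP := by
  have hR := pvSorted2_pairwise adif
  have hperm := PySem.List.sorted2_perm adif (·.1) (·.2) false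
  have hnd' : ((PySem.List.sorted2 adif (·.1) (·.2)).map (·.2)).Nodup :=
    ((hperm.map (·.2)).nodup_iff).mpr hnd
  have hpne : (PySem.List.sorted2 adif (·.1) (·.2)).Pairwise (fun a b => a.2 ≠ b.2) :=
    List.pairwise_map.mp hnd'
  refine (hR.and hpne).imp ?_
  intro a b hab
  obtain ⟨h1, h2⟩ := hab
  rw [pvLt2_false_iff] at h1
  unfold pvLtP
  omega

-- the build loops produce maps over the range, B's entry being the annotated A entry
theorem builds_correspond (ch : String) (words : List String) (len_words : List Int) (n : Int) :
    ((PySem.List.pyRange 0 n 1).foldl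
      (fun acc i =>
        let word := PySem.List.pyGetD words i ""
        let a := pvCount ch word
        acc ++ [(PySem.List.pyGetD len_words i 0 - 2 * a, i, PySem.Str.len word - 2 * a)]) [])
    = ((PySem.List.pyRange 0 n 1).foldl
      (fun acc i =>
        let length := PySem.List.pyGetD len_words i 0
        let a := pvCount ch (PySem.List.pyGetD words i "")
        acc ++ [(length - 2 * a, i)]) []).map (pvG ch words) := by
  rw [PySem.List.foldl_append_singleton_eq_map, PySem.List.foldl_append_singleton_eq_map]
  simp only [List.nil_append, List.map_map]
  rfl

-- A's build list as a map over the range (to read off the distinct indices)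
theorem adif_eq_map (ch : String) (words : List String) (len_words : List Int) (n : Int) :
    ((PySem.List.pyRange 0 n 1).foldl
      (fun acc i =>
        let length := PySem.List.pyGetD len_words i 0
        let a := pvCount ch (PySem.List.pyGetD words i "")
        acc ++ [(length - 2 * a, i)]) [])
    = (PySem.List.pyRange 0 n 1).map
        (fun i => (PySem.List.pyGetD len_words i 0 - 2 * pvCount ch (PySem.List.pyGetD words i ""), i)) := by
  rw [PySem.List.foldl_append_singleton_eq_map]
  simp

-- ===== VERDICT (by name: the statement is the Claim_ definition above) =====
theorem find_spec : Claim_equal_find := by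
  intro ch words dic len_words n _ _
  unfold Spec_find find find_alt
  simp only []
  rw [builds_correspond ch words len_words n]
  set adif := ((PySem.List.pyRange 0 n 1).foldl
      (fun acc i =>
        let length := PySem.List.pyGetD len_words i 0
        let a := pvCount ch (PySem.List.pyGetD words i "")
        acc ++ [(length - 2 * a, i)]) []) with hadif
  have hnd : (adif.map (·.2)).Nodup := by
    rw [hadif, adif_eq_map, List.map_map]
    have : ((fun p : Int × Int => p.2) ∘ (fun i => (PySem.List.pyGetD len_words i 0 - 2 * pvCount ch (PySem.List.pyGetD words i ""), i))) = id := rfl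
    rw [this, List.map_id]
    exact ((pvRange_pairwise 0 n).imp (fun h => ne_of_lt h))
  have hsorted := pvSorted_adif_strict adif hnd
  rw [pvLoopA_eq_pvLoopB ch words _ hsorted]
  have hperm : ((PySem.List.sorted2 adif (·.1) (·.2)).map (pvG ch words)).Perm
      (adif.map (pvG ch words)) :=
    (PySem.List.sorted2_perm adif (·.1) (·.2) false).map (pvG ch words)
  rw [pvLoopB_perm ((PySem.List.sorted2 adif (·.1) (·.2)).map (pvG ch words)).length _ _ _
      le_rfl (pvInj_map_pvG ch words _) hperm]
  congr 1
  ring
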